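-- pv_equiv track=rewrite | github.com/kobrue02/vaccine-trust-prediction | lexical_features.py | count_features
-- ===== SOURCE A (Python) =====
-- def count_features(sent, top_features_dict):
--     """
--     Count occurence of keywords in sents for each label"""
--     counts = []
--     for features in top_features_dict.values():
--         c = 0
--         for ft in features:
--             c += 1 if ft in sent else 0
--         counts.append(c)
--     return counts
-- ===== SOURCE B (Python) =====
-- def count_features(sent, top_features_dict):
--     """
--     Count occurence of keywords in sents for each label"""
--     vals = list(top_features_dict.values())
--     occurrences = {}  # keyword -> label indices, one entry per occurrence
--     for i, features in enumerate(vals):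
--         for ft in features:
--             occurrences.setdefault(ft, []).append(i)
--     counts = [0] * len(vals)
--     for ft, idxs in occurrences.items():
--         if ft in sent:
--             for i in idxs:
--                 counts[i] += 1
--     return counts
-- ===== Notes on version B (the rewrite author's own statement) =====
-- stated objective: alternative
-- what changed: B inverts the data: it builds an inverted index keyword -> label occurrence indices in one pass, then runs ONE substring test per DISTINCT keyword and scatter-adds increments into a preallocated counts array, instead of A's per-label counting loop with a substring scan per keyword occurrence.
import Mathlib
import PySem

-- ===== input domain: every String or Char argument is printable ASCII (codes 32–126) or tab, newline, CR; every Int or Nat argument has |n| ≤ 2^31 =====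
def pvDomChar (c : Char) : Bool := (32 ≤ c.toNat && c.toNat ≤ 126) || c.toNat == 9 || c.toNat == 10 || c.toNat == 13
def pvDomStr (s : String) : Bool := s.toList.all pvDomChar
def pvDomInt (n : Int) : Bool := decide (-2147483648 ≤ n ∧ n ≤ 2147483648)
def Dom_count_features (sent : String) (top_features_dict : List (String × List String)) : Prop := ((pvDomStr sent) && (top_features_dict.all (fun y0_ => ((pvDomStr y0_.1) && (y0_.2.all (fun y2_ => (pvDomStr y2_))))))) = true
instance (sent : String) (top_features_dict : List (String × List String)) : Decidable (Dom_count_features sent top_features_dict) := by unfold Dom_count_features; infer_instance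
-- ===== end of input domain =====

-- B replaces A's per-label counting loops by an inverted index (keyword -> label occurrence
-- indices) plus one substring test per distinct keyword and scatter-added increments
-- (alternative structure, similar measured cost). Return value only.

-- ===== PORT A =====
-- A: for each label's feature list, count features that are substrings of sent, appending to counts.
def count_features (sent : String) (top_features_dict : List (String × List String)) : List Int :=
  (PySem.Dict.ofList top_features_dict).values.foldl
    (fun counts features =>
      counts ++ [features.foldl (fun c ft => c + (if PySem.Str.isIn ft sent then 1 else 0)) 0])
    []

-- ===== PORT B =====
-- B: occurrences = inverted index keyword -> label indices (one per occurrence;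
-- setdefault(ft, []).append(i) is modify with default []); then for each distinct keyword
-- occurring in sent, increment counts at each of its label indices (counts[i] += 1 is
-- pySetD/pyGetD; every stored index is in range, so this is exact).
def count_features_alt (sent : String) (top_features_dict : List (String × List String)) : List Int :=
  let vals := (PySem.Dict.ofList top_features_dict).values
  let occurrences : PySem.Dict String (List Int) :=
    (PySem.List.enumerate vals).foldl
      (fun d p => p.2.foldl (fun d ft => d.modify ft [] (fun l => l ++ [p.1])) d)
      PySem.Dict.empty
  let counts : List Int := List.replicate vals.length 0
  occurrences.items.foldl
    (fun counts q =>
      if PySem.Str.isIn q.1 sent then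
        q.2.foldl (fun counts i =>
          PySem.List.pySetD counts i (PySem.List.pyGetD counts i 0 + 1)) counts
      else counts)
    counts

-- ===== PRECONDITION & SPEC =====
def Spec_count_features (sent : String) (top_features_dict : List (String × List String)) (out : List Int) : Prop := out = count_features_alt sent top_features_dict
instance (sent : String) (top_features_dict : List (String × List String)) (out : List Int) : Decidable (Spec_count_features sent top_features_dict out) := by unfold Spec_count_features; infer_instance

-- ===== CLAIM (what is proved, stated in full; the proofs are below) =====
def Claim_equal_count_features : Prop := ∀ (sent : String) (top_features_dict : List (String × List String)), Dom_count_features sent top_features_dict → Spec_count_features sent top_features_dict (count_features sent top_features_dict)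

-- ===== LEMMAS AND PROOFS =====

-- the flattened (keyword, label-index) occurrence list of B's inverted-index build
def pvPairs (vals : List (List String)) : List (String × Int) :=
  (PySem.List.enumerate vals).flatMap (fun p => p.2.map (fun ft => (ft, p.1)))

-- every stored label index is a valid position of vals
theorem pvPairs_snd (vals : List (List String)) (q : String × Int)
    (hq : q ∈ pvPairs vals) : ∃ m : Nat, m < vals.length ∧ q.2 = (m : Int) := by
  unfold pvPairs at hq
  rw [List.mem_flatMap] at hq
  obtain ⟨p, hp, hq⟩ := hq
  rw [PySem.List.mem_enumerate_iff] at hp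
  obtain ⟨k, hk, rfl⟩ := hp
  rw [List.mem_map] at hq
  obtain ⟨ft, _, rfl⟩ := hq
  exact ⟨k, hk, by simp⟩

-- every keyword of some label's list appears as a first component of the occurrence pairs
theorem pvPairs_fst (vals : List (List String)) (j : Nat) (hj : j < vals.length)
    (ft : String) (hft : ft ∈ vals[j]) : (ft, (j : Int)) ∈ pvPairs vals := by
  unfold pvPairs
  rw [List.mem_flatMap]
  refine ⟨((j : Int), vals[j]), ?_, ?_⟩
  · rw [PySem.List.mem_enumerate_iff]
    exact ⟨j, hj, by simp⟩
  · rw [List.mem_map]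
    exact ⟨ft, hft, rfl⟩

-- multiplicity of label j among keyword k's occurrence pairs = multiplicity of k in vals[j]
theorem pvPairs_count_aux (vals : List (List String)) (s : Int) (k : String) (j : Nat)
    (hj : j < vals.length) :
    (((((PySem.List.enumerate vals s).flatMap (fun p => p.2.map (fun ft => (ft, p.1)))).filter
        (fun q => q.1 == k)).map (fun q => q.2)).count (s + (j : Int)))
      = (vals[j]).count k := by
  induction vals generalizing s j with
  | nil => simp at hj
  | cons fts rest ih =>
      rw [PySem.List.enumerate_cons]
      rw [List.flatMap_cons, List.filter_append, List.map_append, List.count_append]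
      have hhead : ((((fts.map (fun ft => (ft, s))).filter (fun q => q.1 == k)).map
          (fun q : String × Int => q.2)).count (s + (j : Int)))
          = if j = 0 then fts.count k else 0 := by
        have h1 : ((fts.map (fun ft => (ft, s))).filter (fun q => q.1 == k)).map
            (fun q : String × Int => q.2) = List.replicate (fts.count k) s := by
          induction fts with
          | nil => simp
          | cons f fs ihf =>
              have hfs := ihf (by simpa using hj)
              by_cases hf : f = k
              · subst hf; simp [hfs, List.replicate_succ]
              · simp [hf, hfs]
        rw [h1, List.count_replicate]
        by_cases hj0 : j = 0
        · subst hj0; simp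
        · simp only [hj0, if_false]
          rw [if_neg (by simp [beq_iff_eq]; omega)]
      have htail_mem : ∀ q ∈ ((PySem.List.enumerate rest (s + 1)).flatMap
          (fun p => p.2.map (fun ft => (ft, p.1)))), ∃ m : Nat, q.2 = s + 1 + (m : Int) := by
        intro q hq
        rw [List.mem_flatMap] at hq
        obtain ⟨p, hp, hq⟩ := hq
        rw [PySem.List.mem_enumerate_iff] at hp
        obtain ⟨m, hm, rfl⟩ := hp
        rw [List.mem_map] at hq
        obtain ⟨ft, _, rfl⟩ := hq
        exact ⟨m, rfl⟩
      by_cases hj0 : j = 0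
      · subst hj0
        rw [hhead]
        have : ((((PySem.List.enumerate rest (s + 1)).flatMap
            (fun p => p.2.map (fun ft => (ft, p.1)))).filter (fun q => q.1 == k)).map
            (fun q : String × Int => q.2)).count (s + (0 : Nat)) = 0 := by
          rw [List.count_eq_zero]
          intro hmem
          rw [List.mem_map] at hmem
          obtain ⟨q, hq, hq2⟩ := hmem
          obtain ⟨m, hm⟩ := htail_mem q (List.mem_of_mem_filter hq)
          omega
        rw [this]
        simp
      · obtain ⟨j', rfl⟩ := Nat.exists_eq_succ_of_ne_zero hj0
        rw [hhead]
        have harr : s + ((j' + 1 : Nat) : Int) = (s + 1) + (j' : Int) := by push_cast; ring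
        rw [harr, ih (s + 1) j' (by simpa using hj)]
        simp

theorem pvPairs_count (vals : List (List String)) (k : String) (j : Nat) (hj : j < vals.length) :
    ((((pvPairs vals).filter (fun q => q.1 == k)).map (fun q => q.2)).count ((j : Nat) : Int))
      = (vals[j]).count k := by
  have := pvPairs_count_aux vals 0 k j hj
  simpa using this

-- the scatter loop (counts[i] += 1 over idxs) preserves the length
theorem scatter_length (idxs : List Int) (cs : List Int) :
    (idxs.foldl (fun cs i => PySem.List.pySetD cs i (PySem.List.pyGetD cs i 0 + 1)) cs).length
      = cs.length := by
  induction idxs generalizing cs with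
  | nil => rfl
  | cons i t ih => simp [List.foldl_cons, ih, PySem.List.length_pySetD]

-- the scatter loop adds the multiplicity of j in idxs to entry j
theorem scatter_getD (idxs : List Int) (cs : List Int)
    (h : ∀ i ∈ idxs, ∃ m : Nat, m < cs.length ∧ i = (m : Int)) (j : Nat) :
    PySem.List.pyGetD
        (idxs.foldl (fun cs i => PySem.List.pySetD cs i (PySem.List.pyGetD cs i 0 + 1)) cs)
        ((j : Nat) : Int) 0
      = PySem.List.pyGetD cs ((j : Nat) : Int) 0 + (idxs.count ((j : Nat) : Int) : Int) := by
  induction idxs generalizing cs with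
  | nil => simp
  | cons i t ih =>
      obtain ⟨m, hm, rfl⟩ := h i (List.mem_cons_self ..)
      rw [List.foldl_cons]
      rw [ih _ (by intro i hi; simpa [PySem.List.length_pySetD] using h i (List.mem_cons_of_mem _ hi))]
      rw [PySem.List.pyGetD_pySetD_natCast _ _ _ _ _ hm]
      rw [List.count_cons]
      by_cases hjm : j = m
      · subst hjm; simp; omega
      · have hne : ¬ ((j : Int) = (m : Int)) := by exact_mod_cast hjm
        simp [hjm]
        omega

-- the outer fold over the distinct keywords preserves the length
theorem outer_length (P : String → Bool) (g : String → List Int) (K : List String) (cs : List Int) :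
    (K.foldl (fun cs k => if P k then
        (g k).foldl (fun cs i => PySem.List.pySetD cs i (PySem.List.pyGetD cs i 0 + 1)) cs
      else cs) cs).length = cs.length := by
  induction K generalizing cs with
  | nil => rfl
  | cons k K ih =>
      rw [List.foldl_cons, ih]
      by_cases hP : P k
      · rw [if_pos hP, scatter_length]
      · rw [if_neg hP]

-- entry j of the outer fold = initial entry + the guarded multiplicities summed over keywords
theorem outer_getD (P : String → Bool) (g : String → List Int) (K : List String) (cs : List Int)
    (hb : ∀ k ∈ K, ∀ i ∈ g k, ∃ m : Nat, m < cs.length ∧ i = (m : Int)) (j : Nat) :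
    PySem.List.pyGetD
        (K.foldl (fun cs k => if P k then
            (g k).foldl (fun cs i => PySem.List.pySetD cs i (PySem.List.pyGetD cs i 0 + 1)) cs
          else cs) cs)
        ((j : Nat) : Int) 0
      = PySem.List.pyGetD cs ((j : Nat) : Int) 0
        + (K.map (fun k => if P k then ((g k).count ((j : Nat) : Int) : Int) else 0)).sum := by
  induction K generalizing cs with
  | nil => simp
  | cons k K ih =>
      rw [List.foldl_cons, List.map_cons, List.sum_cons]
      by_cases hP : P k
      · rw [if_pos hP, if_pos hP]
        rw [ih _ (by intro k' hk' i hi; simpa [scatter_length] using hb k' (List.mem_cons_of_mem _ hk') i hi)]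
        rw [scatter_getD _ _ (hb k (List.mem_cons_self ..)) j]
        ring
      · rw [if_neg hP, if_neg hP]
        rw [ih _ (fun k' hk' => hb k' (List.mem_cons_of_mem _ hk'))]
        ring

-- indicator sum over a nodup key list containing x
theorem sum_map_indicator (keys : List String) (x : String) (v : Int)
    (hnd : keys.Nodup) (hx : x ∈ keys) :
    (keys.map (fun k => if x = k then v else 0)).sum = v := by
  induction keys with
  | nil => simp at hx
  | cons k ks ih =>
      rw [List.nodup_cons] at hnd
      rcases List.mem_cons.1 hx with rfl | hx'
      · have : (ks.map (fun k => if x = k then v else 0)) = ks.map (fun _ => 0) := by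
          apply List.map_congr_left
          intro y hy
          have : x ≠ y := fun h => hnd.1 (h ▸ hy)
          simp [this]
        simp [this]
      · have : x ≠ k := fun h => hnd.1 (h ▸ hx')
        simp [this, ih hnd.2 hx']

-- counting identity: guarded multiplicities summed over the distinct keys
-- = indicators summed over the list (A's per-label count)
theorem sum_keys_count (P : String → Bool) (keys : List String) (hnd : keys.Nodup)
    (l : List String) (hl : ∀ x ∈ l, x ∈ keys) :
    (keys.map (fun k => if P k then (l.count k : Int) else 0)).sum
      = (l.map (fun ft => if P ft then (1 : Int) else 0)).sum := by
  induction l with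
  | nil => simp
  | cons x t ih =>
      have hsplit : (keys.map (fun k => if P k then ((x :: t).count k : Int) else 0))
          = keys.map (fun k => (if P k then (t.count k : Int) else 0)
              + (if x = k then (if P x then 1 else 0) else 0)) := by
        apply List.map_congr_left
        intro k _
        by_cases hxk : x = k
        · subst hxk
          by_cases hP : P x <;> simp [hP]
        · have : ¬ ((k : String) == x) = true := by simpa [beq_iff_eq] using fun h => hxk h.symm
          by_cases hP : P k <;> simp [hP, hxk]
      rw [hsplit, PySem.List.sum_map_add_int]
      rw [ih (fun y hy => hl y (List.mem_cons_of_mem _ hy))]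
      rw [sum_map_indicator keys x _ hnd (hl x (List.mem_cons_self ..))]
      simp
      ring

-- B's nested build loop over enumerate IS the flat fold over the occurrence pairs
theorem build_eq_foldl_pairs (vals : List (List String)) :
    (PySem.List.enumerate vals).foldl
      (fun d p => p.2.foldl (fun d ft => d.modify ft [] (fun l => l ++ [p.1])) d)
      (PySem.Dict.empty : PySem.Dict String (List Int))
    = (pvPairs vals).foldl (fun d q => d.modify q.1 [] (fun l => l ++ [q.2])) PySem.Dict.empty := by
  unfold pvPairs
  rw [List.foldl_flatMap]
  congr 1
  funext d p
  rw [List.foldl_map]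

theorem count_features_eq (sent : String) (top_features_dict : List (String × List String)) :
    count_features sent top_features_dict = count_features_alt sent top_features_dict := by
  unfold count_features count_features_alt
  set vals := (PySem.Dict.ofList top_features_dict).values with hvals
  simp only []
  set d := (PySem.List.enumerate vals).foldl
      (fun d p => p.2.foldl (fun d ft => d.modify ft [] (fun l => l ++ [p.1])) d)
      (PySem.Dict.empty : PySem.Dict String (List Int)) with hd
  -- characterize the inverted index
  have hbuild : d = (pvPairs vals).foldl
      (fun d q => d.modify q.1 [] (fun l => l ++ [q.2])) PySem.Dict.empty :=
    build_eq_foldl_pairs vals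
  have hgetD : ∀ k, d.getD k [] = ((pvPairs vals).filter (fun q => q.1 == k)).map (fun q => q.2) := by
    intro k
    rw [hbuild, PySem.Dict.getD_foldl_modify_append, PySem.Dict.getD_empty]
    simp
  have hnodup : d.keys.Nodup := by
    rw [hbuild]
    exact PySem.Dict.nodup_keys_foldl_modify_key (pvPairs vals) Prod.fst []
      (fun _ q => fun l => l ++ [q.2]) PySem.Dict.empty PySem.Dict.nodup_keys_empty
  have hmemkeys : ∀ ft, ft ∈ d.keys ↔ ft ∈ (pvPairs vals).map Prod.fst := by
    intro ft
    rw [hbuild]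
    rw [PySem.Dict.keys_foldl_modify_key (pvPairs vals) Prod.fst []
      (fun _ q => fun l => l ++ [q.2]) PySem.Dict.empty]
    rw [PySem.Set.mem_update, PySem.Dict.keys_empty]
    simp
  have hitems : d.items = d.keys.map (fun k => (k, d.getD k [])) :=
    PySem.Dict.items_eq_map_keys d hnodup []
  -- rewrite the A side to a map
  have hA := PySem.List.foldl_append_singleton_eq_map
    (fun (features : List String) => List.foldl (fun c ft => c + (if PySem.Str.isIn ft sent then (1 : Int) else 0)) 0 features) vals []
  rw [hA, List.nil_append]
  -- rewrite the B side to a fold over the distinct keys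
  rw [hitems, List.foldl_map]
  -- pointwise comparison
  apply List.ext_getElem
  · have hL0 := outer_length (fun ft => PySem.Str.isIn ft sent) (fun k => d.getD k []) d.keys (List.replicate vals.length (0 : Int))
    rw [List.length_map]
    exact (hL0.trans (by simp)).symm
  · intro j h1 h2
    rw [List.length_map] at h1
    have hb : ∀ k ∈ d.keys, ∀ i ∈ d.getD k [],
        ∃ m : Nat, m < (List.replicate vals.length (0 : Int)).length ∧ i = (m : Int) := by
      intro k _ i hi
      rw [hgetD k, List.mem_map] at hi
      obtain ⟨q, hq, rfl⟩ := hi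
      obtain ⟨m, hm, hq2⟩ := pvPairs_snd vals q (List.mem_of_mem_filter hq)
      exact ⟨m, by simpa using hm, hq2⟩
    have hout := outer_getD (fun ft => PySem.Str.isIn ft sent) (fun k => d.getD k []) d.keys (List.replicate vals.length (0 : Int))
      (by simpa using hb) j
    have hL : (d.keys.foldl (fun cs k => if PySem.Str.isIn k sent then
          (d.getD k []).foldl (fun cs i => PySem.List.pySetD cs i (PySem.List.pyGetD cs i 0 + 1)) cs
        else cs) (List.replicate vals.length (0 : Int))).length = vals.length :=
      (outer_length (fun ft => PySem.Str.isIn ft sent) (fun k => d.getD k []) d.keys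
        (List.replicate vals.length (0 : Int))).trans (by simp)
    have hget := PySem.List.pyGetD_eq_getElem
      (d.keys.foldl (fun cs k => if PySem.Str.isIn k sent then
          (d.getD k []).foldl (fun cs i => PySem.List.pySetD cs i (PySem.List.pyGetD cs i 0 + 1)) cs
        else cs) (List.replicate vals.length (0 : Int))) (i := (j : Int)) 0
      (by positivity) (by rw [hL]; exact_mod_cast h1)
    simp only [Int.toNat_natCast] at hget
    rw [List.getElem_map, ← hget, hout]
    have hrep : PySem.List.pyGetD (List.replicate vals.length (0 : Int)) ((j : Nat) : Int) 0 = 0 := by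
      rw [PySem.List.pyGetD_eq_getElem _ _ (by positivity) (by simpa using (by exact_mod_cast h1 : ((j : Nat) : Int) < (vals.length : Int)))]
      simp
    rw [hrep, zero_add]
    have hmapcong : d.keys.map (fun k => if PySem.Str.isIn k sent then (((d.getD k []).count ((j : Nat) : Int) : Int)) else 0)
        = d.keys.map (fun k => if PySem.Str.isIn k sent then ((vals[j].count k : Int)) else 0) := by
      apply List.map_congr_left
      intro k _
      rw [hgetD k, pvPairs_count vals k j h1]
    rw [hmapcong]
    rw [sum_keys_count (fun ft => PySem.Str.isIn ft sent) d.keys hnodup vals[j]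
      (by intro x hx
          rw [hmemkeys, List.mem_map]
          exact ⟨(x, (j : Int)), pvPairs_fst vals j h1 x hx, rfl⟩)]
    rw [PySem.List.foldl_add vals[j] (fun ft => if PySem.Str.isIn ft sent then (1 : Int) else 0) 0, zero_add]

-- ===== VERDICT (by name: the statement is the Claim_ definition above) =====
theorem count_features_spec : Claim_equal_count_features := by
  intro sent tfd _
  unfold Spec_count_features
  exact count_features_eq sent tfd
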